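-- pv_equiv track=rewrite | github.com/ansufei/scrapping_word | src/mise_en_page.py | narrow_location_hidden_page_numbers
-- ===== SOURCE A (Python) =====
-- def narrow_location_hidden_page_numbers(first_page, total_pages, found_pages):
--     # circumscribe location
--     missing_pages = set(range(first_page,total_pages)) - set(found_pages.keys())
--     missing = {}
--     for page in missing_pages:
--         # nearest found pages
--         # before
--         bef = [page - x for x in found_pages.keys() if x < page]
--         bef_page = 0
--         if len(bef) > 0:
--             bef_page = found_pages[page - min(bef)]
--         # after
--         aft = [x - page for x in found_pages.keys() if x > page]
--         aft_page = -1
--         if len(aft) > 0: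
--             aft_page = found_pages[page + min(aft)]
--         missing[page] = [bef_page,aft_page]
--     return missing
-- ===== SOURCE B (Python) =====
-- def narrow_location_hidden_page_numbers(first_page, total_pages, found_pages):
--     # Nearest found keys outside the range once, then two linear sweeps over the
--     # page range carrying the nearest found value.
--     bef_list = [k for k in found_pages if k < first_page]
--     bef = found_pages[max(bef_list)] if bef_list else 0
--     aft_list = [k for k in found_pages if k >= total_pages]
--     aft = found_pages[min(aft_list)] if aft_list else -1
--     # descending sweep: nearest found value after each missing page
--     afts = {}
--     for page in range(total_pages - 1, first_page - 1, -1):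
--         if page in found_pages:
--             aft = found_pages[page]
--         else:
--             afts[page] = aft
--     # ascending sweep: nearest found value before each missing page
--     befs = {}
--     for page in range(first_page, total_pages):
--         if page in found_pages:
--             bef = found_pages[page]
--         else:
--             befs[page] = bef
--     missing_pages = set(range(first_page, total_pages)) - set(found_pages)
--     return {page: [befs[page], afts[page]] for page in missing_pages}
-- ===== Notes on version B (the rewrite author's own statement) =====
-- stated objective: alternative
-- what changed: Replaces A's per-missing-page scan of all found keys by one filtered pass over the keys for the nearest keys outside the page range plus two linear sweeps (descending then ascending) over the range that carry the nearest found value.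
import Mathlib
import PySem

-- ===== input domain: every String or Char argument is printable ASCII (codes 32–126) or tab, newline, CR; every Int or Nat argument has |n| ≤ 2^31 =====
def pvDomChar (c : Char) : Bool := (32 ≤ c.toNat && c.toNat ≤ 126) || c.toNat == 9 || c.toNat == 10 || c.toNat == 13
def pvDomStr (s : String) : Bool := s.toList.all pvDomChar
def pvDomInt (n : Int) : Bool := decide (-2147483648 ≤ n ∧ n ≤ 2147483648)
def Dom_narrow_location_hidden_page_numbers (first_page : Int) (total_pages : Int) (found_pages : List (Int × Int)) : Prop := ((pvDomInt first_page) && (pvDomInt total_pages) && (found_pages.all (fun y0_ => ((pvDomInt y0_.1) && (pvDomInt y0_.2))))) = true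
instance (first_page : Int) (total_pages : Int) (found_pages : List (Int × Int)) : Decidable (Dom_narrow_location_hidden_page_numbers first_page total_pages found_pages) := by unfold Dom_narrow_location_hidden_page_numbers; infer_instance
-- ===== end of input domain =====

-- B replaces A's per-missing-page scan of all found keys by one filtered pass over the keys
-- plus two linear sweeps over the page range carrying the nearest found value (objective: alternative).


-- ===== PORT A =====
-- loop body of A: [bef_page, aft_page] for one missing page
-- ('min(bef)' is guarded by 'len(bef) > 0' in the Python: min? = none exactly when the list is
--  empty, so the match reproduces the guard; the dict lookup key is always present, so getD is exact)
def aNearest (d : PySem.Dict Int Int) (page : Int) : List Int :=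
  let bef := (d.keys.filter (fun x => decide (x < page))).map (fun x => page - x)
  let bef_page : Int :=
    match PySem.List.min? bef (fun y => y) with
    | none => 0
    | some m => d.getD (page - m) 0
  let aft := (d.keys.filter (fun x => decide (page < x))).map (fun x => x - page)
  let aft_page : Int :=
    match PySem.List.min? aft (fun y => y) with
    | none => -1
    | some m => d.getD (page + m) (-1)
  [bef_page, aft_page]

-- NOTE: Python iterates the set 'missing_pages' in hash order and returns a dict; dict outputs
-- are compared as key/value maps, so the port iterates the set's elements in construction order.
def narrow_location_hidden_page_numbers (first_page : Int) (total_pages : Int) (found_pages : List (Int × Int)) : List (Int × List Int) :=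
  let d : PySem.Dict Int Int := PySem.Dict.ofList found_pages
  let missing_pages : PySem.Set Int :=
    PySem.Set.diff (PySem.Set.ofList (PySem.List.pyRange first_page total_pages 1))
      (PySem.Set.ofList d.keys)
  let missing : PySem.Dict Int (List Int) :=
    missing_pages.foldl (fun missing page => missing.insert page (aNearest d page)) PySem.Dict.empty
  missing.items

-- ===== PORT B =====
-- descending-sweep loop body (state: running 'aft' value, dict 'afts'); dict lookups are on
-- keys that are always present, so getD is exact
def bDescStep (d : PySem.Dict Int Int) (s : Int × PySem.Dict Int Int) (page : Int) : Int × PySem.Dict Int Int :=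
  if d.contains page then (d.getD page (-1), s.2) else (s.1, s.2.insert page s.1)
-- ascending-sweep loop body (state: running 'bef' value, dict 'befs')
def bAscStep (d : PySem.Dict Int Int) (s : Int × PySem.Dict Int Int) (page : Int) : Int × PySem.Dict Int Int :=
  if d.contains page then (d.getD page 0, s.2) else (s.1, s.2.insert page s.1)

-- 'max(bef_list)' / 'min(aft_list)' are guarded by the emptiness test in the Python:
-- max?/min? = none exactly on the empty list, so the match reproduces the guard
def narrow_location_hidden_page_numbers_alt (first_page : Int) (total_pages : Int) (found_pages : List (Int × Int)) : List (Int × List Int) :=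
  let d : PySem.Dict Int Int := PySem.Dict.ofList found_pages
  let bef_list := d.keys.filter (fun k => decide (k < first_page))
  let bef0 : Int := match PySem.List.max? bef_list (fun y => y) with
    | none => 0
    | some k => d.getD k 0
  let aft_list := d.keys.filter (fun k => decide (total_pages ≤ k))
  let aft0 : Int := match PySem.List.min? aft_list (fun y => y) with
    | none => -1
    | some k => d.getD k (-1)
  let afts : PySem.Dict Int Int :=
    ((PySem.List.pyRange (total_pages - 1) (first_page - 1) (-1)).foldl (bDescStep d) (aft0, PySem.Dict.empty)).2
  let befs : PySem.Dict Int Int :=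
    ((PySem.List.pyRange first_page total_pages 1).foldl (bAscStep d) (bef0, PySem.Dict.empty)).2
  -- result dict assembled over the same set difference as A's loop (dict lookups always hit)
  let missing_pages : PySem.Set Int :=
    PySem.Set.diff (PySem.Set.ofList (PySem.List.pyRange first_page total_pages 1))
      (PySem.Set.ofList d.keys)
  let missing : PySem.Dict Int (List Int) :=
    missing_pages.foldl (fun m page => m.insert page [befs.getD page 0, afts.getD page 0]) PySem.Dict.empty
  missing.items

-- ===== PRECONDITION & SPEC =====
def Spec_narrow_location_hidden_page_numbers (first_page : Int) (total_pages : Int) (found_pages : List (Int × Int)) (out : List (Int × List Int)) : Prop := out = narrow_location_hidden_page_numbers_alt first_page total_pages found_pages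
instance (first_page : Int) (total_pages : Int) (found_pages : List (Int × Int)) (out : List (Int × List Int)) : Decidable (Spec_narrow_location_hidden_page_numbers first_page total_pages found_pages out) := by unfold Spec_narrow_location_hidden_page_numbers; infer_instance

-- ===== CLAIM (what is proved, stated in full; the proofs are below) =====
def Claim_equal_narrow_location_hidden_page_numbers : Prop := ∀ (first_page : Int) (total_pages : Int) (found_pages : List (Int × Int)), Dom_narrow_location_hidden_page_numbers first_page total_pages found_pages → Spec_narrow_location_hidden_page_numbers first_page total_pages found_pages (narrow_location_hidden_page_numbers first_page total_pages found_pages)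

-- ===== LEMMAS AND PROOFS =====

-- value of the nearest found page before / after p (the common functional specification)
def befv (d : PySem.Dict Int Int) (p : Int) : Int :=
  match PySem.List.max? (d.keys.filter (fun x => decide (x < p))) (fun y => y) with
  | none => 0
  | some k => d.getD k 0
def aftv (d : PySem.Dict Int Int) (p : Int) : Int :=
  match PySem.List.min? (d.keys.filter (fun x => decide (p < x))) (fun y => y) with
  | none => -1
  | some k => d.getD k (-1)

def canonOut (first_page total_pages : Int) (d : PySem.Dict Int Int) : List (Int × List Int) :=
  ((PySem.List.pyRange first_page total_pages 1).filter (fun p => !(d.contains p))).map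
    (fun p => (p, [befv d p, aftv d p]))

lemma min_id_eq_some_iff (l : List Int) (m : Int) :
    PySem.List.min? l (fun y => y) = some m ↔ m ∈ l ∧ ∀ y ∈ l, m ≤ y := by
  constructor
  · intro h
    exact ⟨PySem.List.min?_mem h, fun y hy => PySem.List.min?_isMin h y hy⟩
  · rintro ⟨hm, hall⟩
    cases h : PySem.List.min? l (fun y => y) with
    | none => rw [PySem.List.min?_eq_none_iff] at h; subst h; cases hm
    | some m' =>
      have h1 := PySem.List.min?_mem h
      have h2 := PySem.List.min?_isMin h
      have : m' = m := le_antisymm (h2 m hm) (hall m' h1)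
      rw [this]

lemma max_id_eq_some_iff (l : List Int) (m : Int) :
    PySem.List.max? l (fun y => y) = some m ↔ m ∈ l ∧ ∀ y ∈ l, y ≤ m := by
  constructor
  · intro h
    exact ⟨PySem.List.max?_mem h, fun y hy => PySem.List.max?_isMax h y hy⟩
  · rintro ⟨hm, hall⟩
    cases h : PySem.List.max? l (fun y => y) with
    | none => rw [PySem.List.max?_eq_none_iff] at h; subst h; cases hm
    | some m' =>
      have h1 := PySem.List.max?_mem h
      have h2 := PySem.List.max?_isMax h
      have : m' = m := le_antisymm (hall m' h1) (h2 m hm)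
      rw [this]

lemma min_map_const_sub (c : Int) (l : List Int) :
    PySem.List.min? (l.map (fun x => c - x)) (fun y => y)
      = (PySem.List.max? l (fun y => y)).map (fun k => c - k) := by
  cases h : PySem.List.max? l (fun y => y) with
  | none =>
    rw [PySem.List.max?_eq_none_iff] at h; subst h
    rfl
  | some k =>
    have h1 := PySem.List.max?_mem h
    have h2 := PySem.List.max?_isMax h
    rw [Option.map_some, min_id_eq_some_iff]
    refine ⟨List.mem_map.mpr ⟨k, h1, rfl⟩, ?_⟩
    intro y hy
    obtain ⟨x, hx, rfl⟩ := List.mem_map.mp hy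
    have := h2 x hx
    omega

lemma min_map_sub_const (c : Int) (l : List Int) :
    PySem.List.min? (l.map (fun x => x - c)) (fun y => y)
      = (PySem.List.min? l (fun y => y)).map (fun k => k - c) := by
  cases h : PySem.List.min? l (fun y => y) with
  | none =>
    rw [PySem.List.min?_eq_none_iff] at h; subst h
    rfl
  | some k =>
    have h1 := PySem.List.min?_mem h
    have h2 := PySem.List.min?_isMin h
    rw [Option.map_some, min_id_eq_some_iff]
    refine ⟨List.mem_map.mpr ⟨k, h1, rfl⟩, ?_⟩
    intro y hy
    obtain ⟨x, hx, rfl⟩ := List.mem_map.mp hy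
    have := h2 x hx
    omega

lemma aNearest_eq (d : PySem.Dict Int Int) (page : Int) :
    aNearest d page = [befv d page, aftv d page] := by
  simp only [aNearest]
  rw [min_map_const_sub, min_map_sub_const]
  cases hb : PySem.List.max? (d.keys.filter (fun x => decide (x < page))) (fun y => y) with
  | none =>
    cases ha : PySem.List.min? (d.keys.filter (fun x => decide (page < x))) (fun y => y) with
    | none => simp [befv, aftv, hb, ha]
    | some k =>
      have hk : page + (k - page) = k := by ring
      simp [befv, aftv, hb, ha, hk]
  | some k =>
    have hk : page - (page - k) = k := by ring
    cases ha : PySem.List.min? (d.keys.filter (fun x => decide (page < x))) (fun y => y) with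
    | none => simp [befv, aftv, hb, ha, hk]
    | some k' =>
      have hk' : page + (k' - page) = k' := by ring
      simp [befv, aftv, hb, ha, hk, hk']

lemma foldl_insert_items {ν : Type} (f : Int → ν) :
    ∀ (pages : List Int) (m : PySem.Dict Int ν), pages.Nodup →
      (∀ p ∈ pages, m.contains p = false) →
      (pages.foldl (fun acc p => acc.insert p (f p)) m).items
        = m.items ++ pages.map (fun p => (p, f p)) := by
  intro pages
  induction pages with
  | nil => intro m _ _; simp
  | cons p t ih =>
    intro m hnd hm
    simp only [List.foldl_cons, List.map_cons]
    rw [ih (m.insert p (f p)) (List.nodup_cons.mp hnd).2 ?_]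
    · rw [PySem.Dict.items_insert_of_not_contains m (f p) (hm p (List.mem_cons_self ..))]
      simp
    · intro q hq
      rw [PySem.Dict.contains_insert]
      have hqp : q ≠ p := fun e => (List.nodup_cons.mp hnd).1 (e ▸ hq)
      simp [hqp, hm q (List.mem_cons_of_mem _ hq)]

lemma missing_set_eq (first_page total_pages : Int) (found_pages : List (Int × Int)) :
    PySem.Set.diff (PySem.Set.ofList (PySem.List.pyRange first_page total_pages 1))
        (PySem.Set.ofList (PySem.Dict.ofList found_pages : PySem.Dict Int Int).keys)
      = (PySem.List.pyRange first_page total_pages 1).filter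
          (fun p => !(PySem.Dict.contains (PySem.Dict.ofList found_pages) p)) := by
  rw [PySem.Set.ofList_eq_self_of_nodup _ (PySem.Dict.nodup_keys_ofList found_pages),
    PySem.Set.ofList_eq_self_of_nodup _ (PySem.List.nodup_pyRange_one first_page total_pages)]
  simp only [PySem.Set.diff]
  congr 1
  funext x
  congr 1
  rw [Bool.eq_iff_iff, PySem.Set.contains_iff, PySem.Dict.contains_iff_mem_keys]

lemma A_eq_canon (first_page total_pages : Int) (found_pages : List (Int × Int)) :
    narrow_location_hidden_page_numbers first_page total_pages found_pages
      = canonOut first_page total_pages (PySem.Dict.ofList found_pages) := by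
  simp only [narrow_location_hidden_page_numbers]
  rw [missing_set_eq,
    foldl_insert_items (fun page => aNearest (PySem.Dict.ofList found_pages) page) _ _
      ((PySem.List.nodup_pyRange_one first_page total_pages).filter _)
      (fun p _ => PySem.Dict.contains_empty p)]
  simp [canonOut, aNearest_eq, PySem.Dict.empty]

lemma befv_found (d : PySem.Dict Int Int) (q : Int) (h : d.contains q = true) :
    befv d (q + 1) = d.getD q 0 := by
  unfold befv
  have hq : PySem.List.max? (d.keys.filter (fun x => decide (x < q + 1))) (fun y => y) = some q := by
    rw [max_id_eq_some_iff]
    refine ⟨List.mem_filter.mpr ⟨(PySem.Dict.contains_iff_mem_keys d q).mp h, by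
      simp only [decide_eq_true_eq]; omega⟩, ?_⟩
    intro y hy
    have := (List.mem_filter.mp hy).2
    simp only [decide_eq_true_eq] at this
    omega
  rw [hq]

lemma befv_skip (d : PySem.Dict Int Int) (q : Int) (h : d.contains q = false) :
    befv d (q + 1) = befv d q := by
  unfold befv
  have hf : d.keys.filter (fun x => decide (x < q + 1)) = d.keys.filter (fun x => decide (x < q)) := by
    apply List.filter_congr
    intro x hx
    have hxq : x ≠ q := fun e => by
      rw [e] at hx
      rw [(PySem.Dict.contains_iff_mem_keys d q).mpr hx] at h
      cases h
    rw [decide_eq_decide]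
    omega
  rw [hf]

lemma aftv_found (d : PySem.Dict Int Int) (q : Int) (h : d.contains q = true) :
    aftv d (q - 1) = d.getD q (-1) := by
  unfold aftv
  have hq : PySem.List.min? (d.keys.filter (fun x => decide (q - 1 < x))) (fun y => y) = some q := by
    rw [min_id_eq_some_iff]
    refine ⟨List.mem_filter.mpr ⟨(PySem.Dict.contains_iff_mem_keys d q).mp h, by
      simp only [decide_eq_true_eq]; omega⟩, ?_⟩
    intro y hy
    have := (List.mem_filter.mp hy).2
    simp only [decide_eq_true_eq] at this
    omega
  rw [hq]

lemma aftv_skip (d : PySem.Dict Int Int) (q : Int) (h : d.contains q = false) :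
    aftv d (q - 1) = aftv d q := by
  unfold aftv
  have hf : d.keys.filter (fun x => decide (q - 1 < x)) = d.keys.filter (fun x => decide (q < x)) := by
    apply List.filter_congr
    intro x hx
    have hxq : x ≠ q := fun e => by
      rw [e] at hx
      rw [(PySem.Dict.contains_iff_mem_keys d q).mpr hx] at h
      cases h
    rw [decide_eq_decide]
    omega
  rw [hf]

lemma desc_sweep (d : PySem.Dict Int Int) (fp : Int) :
    ∀ (n : Nat) (q : Int) (m : PySem.Dict Int Int),
      fp - 1 ≤ q → (q - (fp - 1)).toNat = n →
      (∀ p : Int, fp ≤ p → p ≤ q → m.contains p = false) →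
      (PySem.List.pyRange q (fp - 1) (-1)).foldl (bDescStep d) (aftv d q, m)
        = (aftv d (fp - 1),
           ⟨m.items ++ ((PySem.List.pyRange q (fp - 1) (-1)).filter (fun p => !(d.contains p))).map
               (fun p => (p, aftv d p))⟩) := by
  intro n
  induction n with
  | zero =>
    intro q m hq h0 _
    have hq' : q = fp - 1 := by omega
    subst hq'
    rw [PySem.List.pyRange_neg_one_eq_nil le_rfl]
    simp
  | succ n ih =>
    intro q m hq h0 hm
    have hlt : fp - 1 < q := by omega
    rw [PySem.List.pyRange_neg_one_cons hlt]
    simp only [List.foldl_cons, List.filter_cons]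
    cases hc : PySem.Dict.contains d q with
    | true =>
      have hstep : bDescStep d (aftv d q, m) q = (aftv d (q - 1), m) := by
        simp [bDescStep, hc, aftv_found d q hc]
      rw [hstep, ih (q - 1) m (by omega) (by omega) (fun p h1 h2 => hm p h1 (by omega))]
      simp
    | false =>
      have hstep : bDescStep d (aftv d q, m) q = (aftv d (q - 1), m.insert q (aftv d q)) := by
        simp [bDescStep, hc, aftv_skip d q hc]
      rw [hstep, ih (q - 1) _ (by omega) (by omega) ?_]
      · rw [PySem.Dict.items_insert_of_not_contains m _ (hm q (by omega) le_rfl)]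
        simp
      · intro p h1 h2
        rw [PySem.Dict.contains_insert]
        have hpq : p ≠ q := by omega
        simp [hpq, hm p h1 (by omega)]

lemma asc_sweep (d : PySem.Dict Int Int) (tp : Int) :
    ∀ (n : Nat) (q : Int) (m : PySem.Dict Int Int),
      q ≤ tp → (tp - q).toNat = n →
      (∀ p : Int, q ≤ p → p < tp → m.contains p = false) →
      (PySem.List.pyRange q tp 1).foldl (bAscStep d) (befv d q, m)
        = (befv d tp,
           ⟨m.items ++ ((PySem.List.pyRange q tp 1).filter (fun p => !(d.contains p))).map
               (fun p => (p, befv d p))⟩) := by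
  intro n
  induction n with
  | zero =>
    intro q m hq h0 _
    have hq' : q = tp := by omega
    subst hq'
    rw [PySem.List.pyRange_one_eq_nil le_rfl]
    simp
  | succ n ih =>
    intro q m hq h0 hm
    have hlt : q < tp := by omega
    rw [PySem.List.pyRange_one_cons hlt]
    simp only [List.foldl_cons, List.filter_cons]
    cases hc : PySem.Dict.contains d q with
    | true =>
      have hstep : bAscStep d (befv d q, m) q = (befv d (q + 1), m) := by
        simp [bAscStep, hc, befv_found d q hc]
      rw [hstep, ih (q + 1) m (by omega) (by omega) (fun p h1 h2 => hm p (by omega) h2)]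
      simp
    | false =>
      have hstep : bAscStep d (befv d q, m) q = (befv d (q + 1), m.insert q (befv d q)) := by
        simp [bAscStep, hc, befv_skip d q hc]
      rw [hstep, ih (q + 1) _ (by omega) (by omega) ?_]
      · rw [PySem.Dict.items_insert_of_not_contains m _ (hm q le_rfl hlt)]
        simp
      · intro p h1 h2
        rw [PySem.Dict.contains_insert]
        have hpq : p ≠ q := by omega
        simp [hpq, hm p (by omega) h2]

lemma B_eq_canon (first_page total_pages : Int) (found_pages : List (Int × Int)) :
    narrow_location_hidden_page_numbers_alt first_page total_pages found_pages
      = canonOut first_page total_pages (PySem.Dict.ofList found_pages) := by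
  by_cases h : first_page ≤ total_pages
  · simp only [narrow_location_hidden_page_numbers_alt]
    set d : PySem.Dict Int Int := PySem.Dict.ofList found_pages with hd
    have hbef0 : (match PySem.List.max? (d.keys.filter fun k => decide (k < first_page)) (fun y => y) with
        | none => (0 : Int) | some k => d.getD k 0) = befv d first_page := by
      unfold befv; rfl
    have hfilter : (d.keys.filter fun k => decide (total_pages ≤ k))
        = d.keys.filter fun x => decide (total_pages - 1 < x) :=
      List.filter_congr (fun x _ => by rw [decide_eq_decide]; omega)
    have haft0 : (match PySem.List.min? (d.keys.filter fun k => decide (total_pages ≤ k)) (fun y => y) with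
        | none => (-1 : Int) | some k => d.getD k (-1)) = aftv d (total_pages - 1) := by
      rw [hfilter]; unfold aftv; rfl
    simp only [hbef0, haft0]
    have hdesc := desc_sweep d first_page (total_pages - 1 - (first_page - 1)).toNat
      (total_pages - 1) PySem.Dict.empty (by omega) rfl (fun p _ _ => PySem.Dict.contains_empty p)
    have hafts_eq : ((PySem.List.pyRange (total_pages - 1) (first_page - 1) (-1)).foldl
          (bDescStep d) (aftv d (total_pages - 1), PySem.Dict.empty)).2
        = PySem.Dict.mk (((PySem.List.pyRange (total_pages - 1) (first_page - 1) (-1)).filter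
        (fun p => !(PySem.Dict.contains d p))).map (fun p => (p, aftv d p))) := by
      rw [hdesc]; simp [PySem.Dict.empty]
    have hasc := asc_sweep d total_pages (total_pages - first_page).toNat first_page
      PySem.Dict.empty h rfl (fun p _ _ => PySem.Dict.contains_empty p)
    have hbefs_eq : ((PySem.List.pyRange first_page total_pages 1).foldl
          (bAscStep d) (befv d first_page, PySem.Dict.empty)).2
        = PySem.Dict.mk (((PySem.List.pyRange first_page total_pages 1).filter
        (fun p => !(PySem.Dict.contains d p))).map (fun p => (p, befv d p))) := by
      rw [hasc]; simp [PySem.Dict.empty]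
    rw [hafts_eq, hbefs_eq, missing_set_eq]
    have hNA : (PySem.Dict.mk (((PySem.List.pyRange (total_pages - 1) (first_page - 1) (-1)).filter
        (fun p => !(PySem.Dict.contains d p))).map (fun p => (p, aftv d p)))).keys.Nodup := by
      show (((((PySem.List.pyRange (total_pages - 1) (first_page - 1) (-1)).filter
        (fun p => !(PySem.Dict.contains d p))).map (fun p => (p, aftv d p)))).map (fun x => x.1)).Nodup
      rw [List.map_map]
      have hid : ((fun x => x.1) ∘ fun p => ((p : Int), aftv d p)) = fun p => p := rfl
      rw [hid, List.map_id']
      refine List.Nodup.filter _ ?_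
      rw [PySem.List.pyRange_neg_one_eq_reverse]
      exact List.nodup_reverse.mpr (PySem.List.nodup_pyRange_one _ _)
    have hNB : (PySem.Dict.mk (((PySem.List.pyRange first_page total_pages 1).filter
        (fun p => !(PySem.Dict.contains d p))).map (fun p => (p, befv d p)))).keys.Nodup := by
      show (((((PySem.List.pyRange first_page total_pages 1).filter
        (fun p => !(PySem.Dict.contains d p))).map (fun p => (p, befv d p)))).map (fun x => x.1)).Nodup
      rw [List.map_map]
      have hid : ((fun x => x.1) ∘ fun p => ((p : Int), befv d p)) = fun p => p := rfl
      rw [hid, List.map_id']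
      exact List.Nodup.filter _ (PySem.List.nodup_pyRange_one _ _)
    have hafts : ∀ p : Int, first_page ≤ p → p < total_pages → PySem.Dict.contains d p = false →
        (PySem.Dict.mk (((PySem.List.pyRange (total_pages - 1) (first_page - 1) (-1)).filter
        (fun p => !(PySem.Dict.contains d p))).map (fun p => (p, aftv d p)))).getD p 0 = aftv d p := by
      intro p h1 h2 hc
      have hmem : ((p, aftv d p) : Int × Int) ∈ (((PySem.List.pyRange (total_pages - 1) (first_page - 1) (-1)).filter
        (fun p => !(PySem.Dict.contains d p))).map (fun p => (p, aftv d p))) :=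
        List.mem_map.mpr ⟨p, List.mem_filter.mpr
          ⟨PySem.List.mem_pyRange_neg_one.mpr ⟨by omega, by omega⟩, by simp [hc]⟩, rfl⟩
      rw [PySem.Dict.getD_eq_get?_getD, PySem.Dict.get?_of_mem_items _ hmem hNA]
      rfl
    have hbefs : ∀ p : Int, first_page ≤ p → p < total_pages → PySem.Dict.contains d p = false →
        (PySem.Dict.mk (((PySem.List.pyRange first_page total_pages 1).filter
        (fun p => !(PySem.Dict.contains d p))).map (fun p => (p, befv d p)))).getD p 0 = befv d p := by
      intro p h1 h2 hc
      have hmem : ((p, befv d p) : Int × Int) ∈ (((PySem.List.pyRange first_page total_pages 1).filter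
        (fun p => !(PySem.Dict.contains d p))).map (fun p => (p, befv d p))) :=
        List.mem_map.mpr ⟨p, List.mem_filter.mpr
          ⟨PySem.List.mem_pyRange_one.mpr ⟨h1, h2⟩, by simp [hc]⟩, rfl⟩
      rw [PySem.Dict.getD_eq_get?_getD, PySem.Dict.get?_of_mem_items _ hmem hNB]
      rfl
    rw [foldl_insert_items
        (fun page => [(PySem.Dict.mk (((PySem.List.pyRange first_page total_pages 1).filter
        (fun p => !(PySem.Dict.contains d p))).map (fun p => (p, befv d p)))).getD page 0, (PySem.Dict.mk (((PySem.List.pyRange (total_pages - 1) (first_page - 1) (-1)).filter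
        (fun p => !(PySem.Dict.contains d p))).map (fun p => (p, aftv d p)))).getD page 0]) _ _
        ((PySem.List.nodup_pyRange_one first_page total_pages).filter _)
        (fun p _ => PySem.Dict.contains_empty p)]
    simp only [canonOut, PySem.Dict.empty, List.nil_append]
    apply List.map_congr_left
    intro p hp
    obtain ⟨hp1, hp2⟩ := List.mem_filter.mp hp
    obtain ⟨hb1, hb2⟩ := PySem.List.mem_pyRange_one.mp hp1
    have hc : PySem.Dict.contains d p = false := by simpa using hp2
    rw [hbefs p hb1 hb2 hc, hafts p hb1 hb2 hc]
  · simp only [narrow_location_hidden_page_numbers_alt]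
    rw [PySem.List.pyRange_one_eq_nil (by omega)]
    simp [canonOut, PySem.Dict.empty, PySem.Set.diff, PySem.Set.ofList, PySem.Set.empty,
      PySem.List.pyRange_one_eq_nil (by omega : total_pages ≤ first_page)]

-- ===== VERDICT (by name: the statement is the Claim_ definition above) =====
theorem narrow_location_hidden_page_numbers_spec : Claim_equal_narrow_location_hidden_page_numbers := by
  intro first_page total_pages found_pages _
  show narrow_location_hidden_page_numbers first_page total_pages found_pages
      = narrow_location_hidden_page_numbers_alt first_page total_pages found_pages
  rw [A_eq_canon, B_eq_canon]
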